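-- pv_equiv track=rewrite | github.com/Sahil-Singla/SearchEngine | tf_idf.py | get_count_in_query
-- ===== SOURCE A (Python) =====
-- def get_count_in_query(query_tokens):
--   query_dict = dict()
--   for word in query_tokens:
--     if word in query_dict:
--       query_dict[word] = query_dict[word]+1;
--     else:
--       query_dict[word] = 1;
--   return query_dict;
-- ===== SOURCE B (Python) =====
-- def get_count_in_query(query_tokens):
--     # sort, then count runs of equal tokens; emit in first-occurrence order
--     counts = {}
--     prev = None
--     run = 0
--     for w in sorted(query_tokens):
--         if w != prev:
--             if prev is not None:
--                 counts[prev] = run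
--             prev = w
--             run = 0
--         run += 1
--     if prev is not None:
--         counts[prev] = run
--     return {w: counts.get(w, 0) for w in dict.fromkeys(query_tokens)}
-- ===== Notes on version B (the rewrite author's own statement) =====
-- stated objective: alternative
-- what changed: Replaces hash-based incremental counting with sort-then-sweep run-length counting (one pass over the sorted copy with a prev/run state machine), then emits the counts in first-occurrence order since a Python dict's insertion order is observable.
import Mathlib
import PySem

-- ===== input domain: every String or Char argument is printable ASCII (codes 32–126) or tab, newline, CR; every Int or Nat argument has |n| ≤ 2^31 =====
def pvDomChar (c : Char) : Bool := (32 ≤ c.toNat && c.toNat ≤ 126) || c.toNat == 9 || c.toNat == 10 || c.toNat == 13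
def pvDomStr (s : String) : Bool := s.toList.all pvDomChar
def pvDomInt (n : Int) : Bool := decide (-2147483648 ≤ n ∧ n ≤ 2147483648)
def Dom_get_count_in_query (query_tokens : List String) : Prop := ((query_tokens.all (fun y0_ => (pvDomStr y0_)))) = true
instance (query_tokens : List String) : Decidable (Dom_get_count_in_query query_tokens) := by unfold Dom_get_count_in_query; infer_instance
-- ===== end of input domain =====

-- B replaces the incremental dict-counting loop with sort-then-sweep run counting, emitting in first-occurrence order; same values.

-- ===== PORT A =====
def get_count_in_query (query_tokens : List String) : List (String × Int) :=
  (query_tokens.foldl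
    (fun query_dict word =>
      if query_dict.contains word then
        query_dict.insert word (query_dict.getD word 0 + 1)
      else
        query_dict.insert word 1)
    PySem.Dict.empty).items

-- ===== PORT B =====
-- 'if prev is not None: counts[prev] = run' (appears inside the loop and once after it)
def pvBClose (c : PySem.Dict String Int) (prev : Option String) (run : Int) :
    PySem.Dict String Int :=
  match prev with
  | none => c
  | some p => c.insert p run

-- the for-loop's body; state = (counts, prev, run), prev = None is Option.none
def pvBStep (s : PySem.Dict String Int × Option String × Int) (w : String) :
    PySem.Dict String Int × Option String × Int :=
  if some w ≠ s.2.1 then (pvBClose s.1 s.2.1 s.2.2, some w, 0 + 1)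
  else (s.1, s.2.1, s.2.2 + 1)

-- the 'counts' variable after the loop and trailing flush
def pvBCounts (query_tokens : List String) : PySem.Dict String Int :=
  let s := (PySem.List.sorted query_tokens (fun x => x) false).foldl
              pvBStep (PySem.Dict.empty, none, 0)
  pvBClose s.1 s.2.1 s.2.2

def get_count_in_query_alt (query_tokens : List String) : List (String × Int) :=
  ((PySem.List.dedup query_tokens).foldl
    (fun d w => d.insert w ((pvBCounts query_tokens).getD w 0)) PySem.Dict.empty).items

-- ===== PRECONDITION & SPEC =====
def Spec_get_count_in_query (query_tokens : List String) (out : List (String × Int)) : Prop := out = get_count_in_query_alt query_tokens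
instance (query_tokens : List String) (out : List (String × Int)) : Decidable (Spec_get_count_in_query query_tokens out) := by unfold Spec_get_count_in_query; infer_instance

-- ===== CLAIM (what is proved, stated in full; the proofs are below) =====
def Claim_equal_get_count_in_query : Prop := ∀ (query_tokens : List String), Dom_get_count_in_query query_tokens → Spec_get_count_in_query query_tokens (get_count_in_query query_tokens)

-- ===== LEMMAS AND PROOFS =====

-- A's loop step is the standard counter step (in the missing-key branch the default is 0)
lemma pvA_step_eq (qs : List String) :
    qs.foldl
      (fun (d : PySem.Dict String Int) word =>
        if d.contains word then d.insert word (d.getD word 0 + 1)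
        else d.insert word 1) PySem.Dict.empty
    = qs.foldl (fun d word => d.insert word (d.getD word 0 + 1)) PySem.Dict.empty := by
  apply PySem.List.foldl_congr_mem
  intro d w _
  by_cases h : d.contains w
  · simp [h]
  · simp only [Bool.not_eq_true] at h
    rw [PySem.Dict.getD_of_not_contains _ _ h]; simp [h]

-- the run-length sweep over a sorted list reads back the occurrence counts
lemma pvB_sweep (l : List String) :
    ∀ (c : PySem.Dict String Int) (prev : Option String) (run : Int),
      l.Pairwise (· ≤ ·) →
      (∀ u, prev = some u → c.getD u 0 = 0 ∧ ∀ x ∈ l, u ≤ x) →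
      (∀ x ∈ l, prev ≠ some x → c.getD x 0 = 0) →
      ∀ v, (pvBClose (l.foldl pvBStep (c, prev, run)).1
              (l.foldl pvBStep (c, prev, run)).2.1
              (l.foldl pvBStep (c, prev, run)).2.2).getD v 0
            = c.getD v 0 + (if prev = some v then run else 0) + l.count v := by
  induction l with
  | nil =>
    intro c prev run _ hprev _ v
    cases prev with
    | none => simp [pvBClose]
    | some u =>
      simp only [pvBClose, List.foldl_nil, List.count_nil]
      rcases hprev u rfl with ⟨hu0, _⟩
      rw [PySem.Dict.getD_insert]
      by_cases hv : v = u
      · subst hv; simp [hu0]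
      · have h2 : some u ≠ some v := fun h => hv (Option.some.inj h).symm
        simp [hv, h2]
  | cons w t ih =>
    intro c prev run hpw hprev hfresh v
    have hwt : ∀ x ∈ t, w ≤ x := fun x hx => (List.pairwise_cons.mp hpw).1 x hx
    have hpt : t.Pairwise (· ≤ ·) := (List.pairwise_cons.mp hpw).2
    by_cases hp : prev = some w
    · -- same run continues
      have hstep : pvBStep (c, prev, run) w = (c, prev, run + 1) := by
        simp [pvBStep, hp]
      rw [List.foldl_cons, hstep, hp]
      rw [ih c (some w) (run + 1) hpt
            (fun u hu => by
              cases hu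
              exact ⟨(hprev w hp).1, hwt⟩)
            (fun x hx hne => hfresh x (List.mem_cons_of_mem _ hx) (hp ▸ hne)) v]
      by_cases hv : v = w
      · subst hv; simp [List.count_cons_self]; ring
      · have h2 : ¬ (some w = some v) := fun h => hv (Option.some.inj h).symm
        simp [h2]
        rw [List.count_cons_of_ne (Ne.symm hv)]
    · -- a new run starts at w
      have hne : some w ≠ prev := fun h => hp h.symm
      cases prev with
      | none =>
        have hstep : pvBStep (c, none, run) w = (c, some w, 0 + 1) := by
          simp [pvBStep, pvBClose]
        rw [List.foldl_cons, hstep]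
        rw [ih c (some w) (0 + 1) hpt
              (fun u hu => by
                cases hu
                exact ⟨hfresh w List.mem_cons_self (by simp), hwt⟩)
              (fun x hx _ => hfresh x (List.mem_cons_of_mem _ hx) (by simp)) v]
        by_cases hv : v = w
        · subst hv
          simp [List.count_cons_self, hfresh v List.mem_cons_self (by simp)]
          ring
        · have h2 : ¬ (some w = some v) := fun h => hv (Option.some.inj h).symm
          simp [h2]
          rw [List.count_cons_of_ne (Ne.symm hv)]
      | some u =>
        have huw : u ≠ w := fun h => hp (by rw [h])
        have h3 : some w ≠ some u := fun h => huw (Option.some.inj h).symm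
        have hstep : pvBStep (c, some u, run) w = (c.insert u run, some w, 0 + 1) := by
          simp [pvBStep, pvBClose, h3]
        rw [List.foldl_cons, hstep]
        have hule : ∀ x ∈ w :: t, u ≤ x := (hprev u rfl).2
        have hunotint : ∀ x ∈ t, u ≠ x := by
          intro x hx h
          subst h
          exact huw (le_antisymm (hule w List.mem_cons_self) (hwt u hx))
        have hcw : c.getD w 0 = 0 :=
          hfresh w List.mem_cons_self (fun h => huw (Option.some.inj h))
        have hcu : c.getD u 0 = 0 := (hprev u rfl).1
        rw [ih (c.insert u run) (some w) (0 + 1) hpt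
              (fun u' hu' => by
                cases hu'
                refine ⟨?_, hwt⟩
                rw [PySem.Dict.getD_insert]
                simp [hcw]
                intro h; exact absurd h.symm huw)
              (fun x hx hxne => by
                rw [PySem.Dict.getD_insert]
                have hxu : ¬ (x = u) := fun h => hunotint x hx h.symm
                simp [hxu]
                exact hfresh x (List.mem_cons_of_mem _ hx)
                  (fun h => hunotint x hx (Option.some.inj h)))
              v]
        rw [PySem.Dict.getD_insert]
        by_cases hvu : v = u
        · subst hvu
          have hvnotw : v ≠ w := huw
          have ht0 : t.count v = 0 := List.count_eq_zero.mpr (fun h => hunotint v h rfl)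
          have h2 : ¬ (some w = some v) := fun h => hvnotw (Option.some.inj h).symm
          rw [List.count_cons_of_ne (Ne.symm hvnotw)]
          simp [h2, ht0, hcu]
        · simp only [if_neg hvu]
          by_cases hvw : v = w
          · subst hvw
            have h2 : ¬ (some u = some v) := fun h => huw (Option.some.inj h)
            simp [List.count_cons_self, hcw, h2]
            ring
          · have h1 : ¬ (some w = some v) := fun h => hvw (Option.some.inj h).symm
            have h2 : ¬ (some u = some v) := fun h => hvu (Option.some.inj h).symm
            simp [h1, h2]
            rw [List.count_cons_of_ne (Ne.symm hvw)]

-- B's counts dict reads back the multiplicities of the input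
lemma pvB_counts (qs : List String) (v : String) :
    (pvBCounts qs).getD v 0 = (qs.count v : Int) := by
  unfold pvBCounts
  rw [pvB_sweep (PySem.List.sorted qs (fun x => x) false) PySem.Dict.empty none 0
        (PySem.List.sorted_pairwise qs (fun x => x))
        (fun u hu => by cases hu)
        (fun x _ _ => by simp [PySem.Dict.getD_empty]) v]
  simp [PySem.Dict.getD_empty,
        (PySem.List.sorted_perm qs (fun x => x) false).count_eq]

theorem get_count_in_query_spec : Claim_equal_get_count_in_query := by
  intro qs _
  unfold Spec_get_count_in_query get_count_in_query get_count_in_query_alt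
  rw [pvA_step_eq, PySem.Dict.foldl_insert_getD_add_one_eq_counter, PySem.Dict.items_counter]
  rw [PySem.Dict.items_foldl_insert_fresh (PySem.List.dedup qs) (fun w => w)
        (fun w => (pvBCounts qs).getD w 0) PySem.Dict.empty
        (fun a _ => PySem.Dict.contains_empty a)
        (by simp)]
  rw [PySem.List.dedup_eq_ofList]
  simp only [PySem.Dict.empty, List.nil_append]
  exact (List.map_congr_left (fun w _ => by rw [pvB_counts])).symm
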